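-- pv_equiv track=rewrite | github.com/sonichuang/My-py-file | 搜索文件里的文字.py | findeachlineindex
-- ===== SOURCE A (Python) =====
-- def findeachlineindex(eachline, substr):# 被调用函数，包含有两个变量一个是主函数的变量：一行的内容字符串，一个是关键字
--     count = 1
--     indexlist = []
--     while count:
--         if count == 1:
--             index = eachline.find(substr)#先找到这一行第一个关键字的位置
--             count += 1
--         else:
--             index = eachline.find(substr, index+1)#从下一个位置开始找，直到找完为止，返回值-1结束循环
--             if index == -1:
--                 break
--         indexlist.append(index) #把这一行关键字的位置写入空的列表
--     return indexlist #函数返回这一行关键字位置的列表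
-- ===== SOURCE B (Python) =====
-- def findeachlineindex(eachline, substr):
--     m = len(substr)
--     positions = [i for i in range(len(eachline) - m + 1) if eachline[i:i+m] == substr]
--     return positions if positions else [-1]
-- ===== Notes on version B (the rewrite author's own statement) =====
-- stated objective: simpler
-- what changed: Replaces the stateful while-loop with counter, resumed str.find calls and break by a single comprehension over every candidate start index using slice equality, keeping A's [-1] not-found sentinel; no str.find at all.
import Mathlib
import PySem

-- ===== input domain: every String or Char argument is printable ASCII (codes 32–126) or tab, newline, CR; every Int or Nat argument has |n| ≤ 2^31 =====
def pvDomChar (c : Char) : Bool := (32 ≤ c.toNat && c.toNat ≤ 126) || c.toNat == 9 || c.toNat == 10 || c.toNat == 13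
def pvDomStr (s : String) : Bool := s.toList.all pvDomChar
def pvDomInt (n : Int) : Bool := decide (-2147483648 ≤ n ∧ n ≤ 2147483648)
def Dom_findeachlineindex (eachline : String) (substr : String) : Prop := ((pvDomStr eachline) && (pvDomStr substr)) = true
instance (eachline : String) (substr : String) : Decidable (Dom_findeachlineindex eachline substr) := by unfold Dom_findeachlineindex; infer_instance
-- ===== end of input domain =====

-- B replaces A's stateful resumed str.find while-loop by one comprehension over all start
-- indices with slice equality (simpler); A's [-1] not-found sentinel is kept unchanged.

-- ===== PORT A =====
-- A's while-loop after its first iteration; the fuel argument only makes the loop total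
-- (each found index is strictly larger than the previous one, so length+1 steps suffice)
def findeachlineindexLoop (s p : List Char) (start : Int) : Nat → List Int
  | 0 => []
  | fuel+1 =>
    let index := PySem.Chars.findFrom s p start
    if index = -1 then []
    else index :: findeachlineindexLoop s p (index + 1) fuel

def findeachlineindex (eachline : String) (substr : String) : List Int :=
  -- count == 1: index = eachline.find(substr), appended unconditionally
  let index := PySem.Str.find eachline substr
  index :: findeachlineindexLoop eachline.toList substr.toList (index + 1) (eachline.toList.length + 1)

-- ===== PORT B =====
def findeachlineindex_alt (eachline : String) (substr : String) : List Int :=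
  let s := eachline.toList
  let m := substr.toList.length
  let positions := (PySem.List.pyRange 0 ((s.length : Int) - m + 1) 1).filter
    (fun i => PySem.List.slice s (some i) (some (i + m)) == substr.toList)
  if positions.isEmpty then [-1] else positions

-- ===== PRECONDITION & SPEC =====
def Spec_findeachlineindex (eachline : String) (substr : String) (out : List Int) : Prop := out = findeachlineindex_alt eachline substr
instance (eachline : String) (substr : String) (out : List Int) : Decidable (Spec_findeachlineindex eachline substr out) := by unfold Spec_findeachlineindex; infer_instance

-- ===== CLAIM (what is proved, stated in full; the proofs are below) =====
def Claim_equal_findeachlineindex : Prop := ∀ (eachline : String) (substr : String), Dom_findeachlineindex eachline substr → Spec_findeachlineindex eachline substr (findeachlineindex eachline substr)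

-- ===== LEMMAS AND PROOFS =====

-- the Boolean occurrence test at start index i, and the list of all occurrence indices
def pvCond (s p : List Char) (i : Int) : Bool := decide (p <+: List.drop i.toNat s)

def pvOcc (s p : List Char) : List Int :=
  (PySem.List.pyRange 0 ((s.length : Int) + 1) 1).filter (pvCond s p)

-- CPython quirk kept by PySem: a start past len(s) gives -1
theorem pvFindFrom_gt (s p : List Char) (k : Int) (h : (s.length : Int) < k) :
    PySem.Chars.findFrom s p k none = -1 := by
  have h0 : ¬ k < 0 := by omega
  simp [PySem.Chars.findFrom, h0]
  omega

theorem pvOccNil (s p : List Char) (k : Nat) (h : ¬ p <:+: List.drop k s) :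
    ((PySem.List.pyRange k ((s.length : Int) + 1) 1).filter (pvCond s p)) = [] := by
  rw [List.filter_eq_nil_iff]
  intro i hi
  rw [PySem.List.mem_pyRange_one] at hi
  simp only [pvCond, decide_eq_true_eq]
  intro hpre
  apply h
  have : List.drop i.toNat s = List.drop (i.toNat - k) (List.drop k s) := by
    rw [List.drop_drop]; congr 1; omega
  rw [this] at hpre
  exact (PySem.Chars.isIn_iff_infix _ _).mp
    ((PySem.Chars.exists_prefix_drop_iff_isIn p (List.drop k s)).mp ⟨_, hpre⟩)

theorem pvOccSplit (s p : List Char) (k : Nat) (idx : Int) (hk : (k : Int) ≤ idx)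
    (hlen : idx ≤ (s.length : Int)) (hpre : p <+: List.drop idx.toNat s)
    (hmin : ∀ i : Nat, k ≤ i → i < idx.toNat → ¬ p <+: List.drop i s) :
    ((PySem.List.pyRange k ((s.length : Int) + 1) 1).filter (pvCond s p)) =
      idx :: ((PySem.List.pyRange (idx + 1) ((s.length : Int) + 1) 1).filter (pvCond s p)) := by
  rw [PySem.List.pyRange_one_append (k : Int) idx ((s.length : Int) + 1) hk (by omega),
    PySem.List.pyRange_one_cons (by omega : idx < (s.length : Int) + 1),
    List.filter_append]
  have h1 : (PySem.List.pyRange (k : Int) idx 1).filter (pvCond s p) = [] := by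
    rw [List.filter_eq_nil_iff]
    intro i hi
    rw [PySem.List.mem_pyRange_one] at hi
    simp only [pvCond, decide_eq_true_eq]
    exact hmin i.toNat (by omega) (by omega)
  have h2 : pvCond s p idx = true := by simp only [pvCond, decide_eq_true_eq]; exact hpre
  rw [h1, List.filter_cons, if_pos h2]
  rfl

theorem pvLoopEq (s p : List Char) (fuel : Nat) (k : Nat) (hf : s.length + 1 ≤ fuel + k) :
    findeachlineindexLoop s p (k : Int) fuel =
      ((PySem.List.pyRange k ((s.length : Int) + 1) 1).filter (pvCond s p)) := by
  induction fuel generalizing k with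
  | zero =>
    rw [PySem.List.pyRange_one_eq_nil (by omega : (s.length : Int) + 1 ≤ k)]
    rfl
  | succ fuel ih =>
    by_cases hk : s.length < k
    · rw [PySem.List.pyRange_one_eq_nil (by omega : (s.length : Int) + 1 ≤ k)]
      simp [findeachlineindexLoop, pvFindFrom_gt s p k (by exact_mod_cast hk)]
    · push Not at hk
      simp only [findeachlineindexLoop]
      set idx := PySem.Chars.findFrom s p (k : Int) none with hidx
      by_cases h1 : idx = -1
      · rw [if_pos h1]
        have hninf : ¬ p <:+: List.drop k s :=
          (PySem.Chars.findFrom_natCast_eq_neg_one_iff s p k hk).mp h1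
        exact (pvOccNil s p k hninf).symm
      · rw [if_neg h1]
        obtain ⟨hge, hpre, hmin⟩ := PySem.Chars.findFrom_natCast_spec s p k hk h1
        have hle : idx ≤ (s.length : Int) := by
          rw [hidx, PySem.Chars.findFrom_natCast s p k hk]
          have := PySem.Chars.find_le_length (List.drop k s) p
          simp only [List.length_drop] at this
          split <;> omega
        have hcast : idx + 1 = ((idx.toNat + 1 : Nat) : Int) := by omega
        rw [pvOccSplit s p k idx hge hle hpre hmin, hcast,
          ih (idx.toNat + 1) (by omega)]

theorem pvA_eq (eachline : String) (substr : String) :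
    findeachlineindex eachline substr =
      (if pvOcc eachline.toList substr.toList = [] then [-1] else pvOcc eachline.toList substr.toList) := by
  set s := eachline.toList
  set p := substr.toList
  simp only [findeachlineindex, PySem.Str.find_eq, pvOcc]
  set i0 := PySem.Chars.find s p with hi0
  by_cases h1 : i0 = -1
  · have hninf : ¬ p <:+: s := (PySem.Chars.find_eq_neg_one_iff s p).mp h1
    have hnil : (PySem.List.pyRange 0 ((s.length : Int) + 1) 1).filter (pvCond s p) = [] := by
      have := pvOccNil s p 0 (by simpa using hninf)
      simpa using this
    rw [if_pos hnil, h1]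
    have : findeachlineindexLoop s p (-1 + 1) (s.length + 1) = [] := by
      have := pvLoopEq s p (s.length + 1) 0 (by omega)
      simp only [Nat.cast_zero] at this
      rw [(by norm_num : (-1 : Int) + 1 = (0:Int)), this, hnil]
    rw [this]
  · have h0 : 0 ≤ i0 := by have := PySem.Chars.neg_one_le_find s p; omega
    have hle : i0 ≤ (s.length : Int) := PySem.Chars.find_le_length s p
    obtain ⟨hpre, hmin⟩ := PySem.Chars.find_spec (s := s) (sub := p) h0
    have hsplit := pvOccSplit s p 0 i0 (by omega) hle hpre (fun i _ hi => hmin i hi)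
    have hcast : i0 + 1 = ((i0.toNat + 1 : Nat) : Int) := by omega
    have hloop := pvLoopEq s p (s.length + 1) (i0.toNat + 1) (by omega)
    rw [hcast, hloop]
    have hne : (PySem.List.pyRange 0 ((s.length : Int) + 1) 1).filter (pvCond s p) ≠ [] := by
      simp only [Nat.cast_zero] at hsplit; rw [hsplit]; simp
    rw [if_neg hne]
    simp only [Nat.cast_zero] at hsplit
    rw [hsplit, ← hcast]

theorem pvB_eq (eachline : String) (substr : String) :
    findeachlineindex_alt eachline substr =
      (if pvOcc eachline.toList substr.toList = [] then [-1] else pvOcc eachline.toList substr.toList) := by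
  set s := eachline.toList
  set p := substr.toList
  simp only [findeachlineindex_alt, pvOcc]
  have hcongr : (PySem.List.pyRange 0 ((s.length : Int) - p.length + 1) 1).filter
      (fun i => PySem.List.slice s (some i) (some (i + p.length)) == p)
      = (PySem.List.pyRange 0 ((s.length : Int) - p.length + 1) 1).filter (pvCond s p) := by
    apply List.filter_congr
    intro i hi
    rw [PySem.List.mem_pyRange_one] at hi
    rw [PySem.List.slice_toNat s (a := i) (b := i + (p.length : Int)) (by omega) (by omega)]
    have hm : ((i + (p.length : Int)).toNat - i.toNat) = p.length := by omega
    rw [hm, Bool.eq_iff_iff, beq_iff_eq]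
    simp only [pvCond, decide_eq_true_eq]
    rw [List.prefix_iff_eq_take]
    exact eq_comm
  rw [hcongr]
  have hocc : (PySem.List.pyRange 0 ((s.length : Int) - p.length + 1) 1).filter (pvCond s p)
      = (PySem.List.pyRange 0 ((s.length : Int) + 1) 1).filter (pvCond s p) := by
    rcases Nat.eq_zero_or_pos p.length with hm0 | hm0
    · rw [hm0]; norm_num
    · by_cases hc : (s.length : Int) - p.length + 1 ≤ 0
      · rw [PySem.List.pyRange_one_eq_nil hc]
        have : ¬ p <:+: List.drop 0 s := by
          simp only [List.drop_zero]
          intro hinf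
          have := hinf.length_le
          omega
        have := pvOccNil s p 0 this
        simp only [Nat.cast_zero] at this
        rw [this]; rfl
      · push Not at hc
        rw [PySem.List.pyRange_one_append 0 ((s.length : Int) - p.length + 1) ((s.length : Int) + 1)
          (by omega) (by omega), List.filter_append]
        have htail : (PySem.List.pyRange ((s.length : Int) - p.length + 1) ((s.length : Int) + 1) 1).filter
            (pvCond s p) = [] := by
          rw [List.filter_eq_nil_iff]
          intro i hi
          rw [PySem.List.mem_pyRange_one] at hi
          simp only [pvCond, decide_eq_true_eq]
          intro hpre
          have hl := hpre.length_le
          simp only [List.length_drop] at hl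
          omega
        rw [htail, List.append_nil]
  rw [hocc]
  rcases h : (PySem.List.pyRange 0 ((s.length : Int) + 1) 1).filter (pvCond s p) with _ | ⟨a, l⟩
  · rfl
  · rfl

-- ===== VERDICT (by name: the statement is the Claim_ definition above) =====
theorem findeachlineindex_spec : Claim_equal_findeachlineindex := by
  intro eachline substr _
  unfold Spec_findeachlineindex
  rw [pvA_eq, pvB_eq]
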